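-- pv_equiv track=rewrite | github.com/eipiguy/planning | scripts/src/collector.py | calculate_num_children
-- ===== SOURCE A (Python) =====
-- def calculate_num_children( section_list ):
-- 	num_children = []
-- 	# Check number of children for each section
-- 	for i,section in enumerate(section_list):
-- 		for j,next_section in enumerate(section_list[i+1:]):
-- 			if( next_section['depth'] > section['depth'] ):
-- 				num_children.append(j + 1)
-- 			else:
-- 				break
-- 	return num_children
-- ===== SOURCE B (Python) =====
-- def calculate_num_children(section_list):
--     n = len(section_list)
--     depths = [s['depth'] for s in section_list]
--     # boundary[i] = index of first later section with depth <= depths[i], or n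
--     boundary = []
--     stack = []  # indices of the pending boundary chain, nearest last
--     for i in reversed(range(n)):
--         while stack and depths[stack[-1]] > depths[i]:
--             stack.pop()
--         boundary.append(stack[-1] if stack else n)
--         stack.append(i)
--     boundary.reverse()
--     out = []
--     for i, b in enumerate(boundary):
--         out.extend(range(1, b - i))
--     return out
-- ===== Notes on version B (the rewrite author's own statement) =====
-- stated objective: alternative
-- what changed: Replaces A's per-section forward rescan with a backward monotonic-stack pass that tabulates, for each section, the index of the first later section of equal-or-lesser depth, followed by a separate emission pass that writes range(1, boundary[i]-i) per section.
-- outside the precondition, e.g. on calculate_num_children([{'x': 0}]): A returns [], B raises KeyError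
import Mathlib
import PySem

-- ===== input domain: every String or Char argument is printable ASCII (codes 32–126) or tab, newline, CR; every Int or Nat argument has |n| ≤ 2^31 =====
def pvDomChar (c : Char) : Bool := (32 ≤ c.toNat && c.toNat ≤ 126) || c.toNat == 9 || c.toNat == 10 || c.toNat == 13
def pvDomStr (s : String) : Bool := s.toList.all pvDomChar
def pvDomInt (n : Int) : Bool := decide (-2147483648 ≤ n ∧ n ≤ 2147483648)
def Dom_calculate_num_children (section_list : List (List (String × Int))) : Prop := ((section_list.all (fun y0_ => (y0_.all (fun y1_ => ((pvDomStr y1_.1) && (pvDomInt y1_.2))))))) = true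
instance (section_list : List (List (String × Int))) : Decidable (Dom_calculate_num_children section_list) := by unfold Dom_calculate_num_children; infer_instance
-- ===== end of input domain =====

-- B replaces A's per-section forward rescans by a backward monotonic-stack boundary table plus an emission pass (alternative decomposition, same output).


-- ===== PORT A =====
-- section['depth']  (0 default is never used under Pre_, where the key is present)
def pyDepth (s : List (String × Int)) : Int := (PySem.Dict.mk s).getD "depth" 0

-- the inner 'for j, next_section in enumerate(section_list[i+1:]): … else break' loop
def aInner (d : Int) : List (List (String × Int)) → Int → List Int → List Int
  | [], _, acc => acc
  | s :: rest, j, acc =>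
    if pyDepth s > d then aInner d rest (j + 1) (acc ++ [j + 1]) else acc

def calculate_num_children (section_list : List (List (String × Int))) : List Int :=
  (PySem.List.enumerate section_list).foldl
    (fun acc p => aInner (pyDepth p.2) (PySem.List.slice section_list (some (p.1 + 1)) none) 0 acc) []

-- ===== PORT B =====
-- 'while stack and depths[stack[-1]] > depths[i]: stack.pop()'  (stack top at head)
def altPopWhile (depths : List Int) (d : Int) : List Int → List Int
  | [] => []
  | t :: rest =>
    if PySem.List.pyGetD depths t 0 > d then altPopWhile depths d rest else t :: rest

-- one iteration of the backward loop: (boundary-so-far, stack) at index i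
def altStep (depths : List Int) (bs : List Int × List Int) (i : Int) : List Int × List Int :=
  let stack := altPopWhile depths (PySem.List.pyGetD depths i 0) bs.2
  (bs.1 ++ [match stack with | [] => (depths.length : Int) | t :: _ => t], i :: stack)

def calculate_num_children_alt (section_list : List (List (String × Int))) : List Int :=
  let depths := section_list.map pyDepth
  let n : Int := (section_list.length : Int)
  let bs := ((PySem.List.pyRange 0 n 1).reverse).foldl (altStep depths) ([], [])
  let boundary := bs.1.reverse
  (PySem.List.enumerate boundary).foldl (fun acc p => acc ++ PySem.List.pyRange 1 (p.2 - p.1) 1) []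

-- ===== PRECONDITION & SPEC =====
-- Pre_ excludes inputs where some section dict lacks the key 'depth': there A raises a KeyError
-- whenever the list has two or more sections, and on a single keyless section A happens to return an empty result
-- while B (which reads every depth up front) raises; see claim.json cites.
def Pre_calculate_num_children (section_list : List (List (String × Int))) : Prop :=
  ∀ s ∈ section_list, ((PySem.Dict.mk s).get? "depth").isSome = true
instance (section_list : List (List (String × Int))) : Decidable (Pre_calculate_num_children section_list) := by unfold Pre_calculate_num_children; infer_instance

def pvWitness_calculate_num_children : (List (List (String × Int))) :=
  [[("depth", 1)], [("depth", 2)], [("depth", 2)], [("depth", 1)]]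

def Spec_calculate_num_children (section_list : List (List (String × Int))) (out : List Int) : Prop := out = calculate_num_children_alt section_list
instance (section_list : List (List (String × Int))) (out : List Int) : Decidable (Spec_calculate_num_children section_list out) := by unfold Spec_calculate_num_children; infer_instance

-- ===== CLAIM (what is proved, stated in full; the proofs are below) =====
def Claim_equal_calculate_num_children : Prop := ∀ (section_list : List (List (String × Int))), Dom_calculate_num_children section_list → Pre_calculate_num_children section_list → Spec_calculate_num_children section_list (calculate_num_children section_list)

-- ===== LEMMAS AND PROOFS =====

-- depth of entry i in the depth list, length of its following strictly-deeper run, and its boundary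
def dAt (depths : List Int) (i : Nat) : Int := depths.getD i 0
def cnt (depths : List Int) (i : Nat) : Nat :=
  (depths.drop (i + 1)).findIdx (fun x => decide (x ≤ dAt depths i))
def bnd (depths : List Int) (i : Nat) : Nat := i + 1 + cnt depths i

-- the chain i, bnd i, bnd (bnd i), … while < length: exactly B's stack contents
def chain (depths : List Int) (i : Nat) : List Nat :=
  if _h : i < depths.length then i :: chain depths (bnd depths i) else []
termination_by depths.length - i
decreasing_by simp [bnd]; omega

theorem chain_nil (depths : List Int) {k : Nat} (h : depths.length ≤ k) : chain depths k = [] := by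
  rw [chain]; simp; omega

theorem chain_cons (depths : List Int) {k : Nat} (h : k < depths.length) :
    chain depths k = k :: chain depths (bnd depths k) := by
  rw [chain]; simp [h]

theorem bnd_le (depths : List Int) {i : Nat} (h : i < depths.length) :
    bnd depths i ≤ depths.length := by
  have h1 := List.findIdx_le_length (p := fun x => decide (x ≤ dAt depths i)) (xs := depths.drop (i + 1))
  simp only [List.length_drop] at h1
  unfold bnd cnt
  omega

theorem lt_bnd (depths : List Int) (i : Nat) : i < bnd depths i := by
  simp only [bnd]; omega

theorem lt_dAt_of_lt_bnd (depths : List Int) {i j : Nat} (hj1 : i < j) (hj2 : j < bnd depths i) :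
    dAt depths i < dAt depths j := by
  have hfi : j - (i + 1) < (depths.drop (i + 1)).findIdx (fun x => decide (x ≤ dAt depths i)) := by
    simp only [bnd, cnt] at hj2; omega
  have hlen : j - (i + 1) < (depths.drop (i + 1)).length :=
    lt_of_lt_of_le hfi List.findIdx_le_length
  have hjl : j < depths.length := by simp only [List.length_drop] at hlen; omega
  have hfalse := List.not_of_lt_findIdx hfi
  rw [List.getElem_drop] at hfalse
  have hidx : i + 1 + (j - (i + 1)) = j := by omega
  simp only [hidx] at hfalse
  have : ¬ (depths[j] ≤ dAt depths i) := by simpa using hfalse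
  have hdj : dAt depths j = depths[j] := List.getD_eq_getElem depths 0 hjl
  omega

theorem bnd_stop (depths : List Int) {i : Nat} (h : bnd depths i < depths.length) :
    dAt depths (bnd depths i) ≤ dAt depths i := by
  have hlen : bnd depths i < depths.length := h
  have hlt : (depths.drop (i + 1)).findIdx (fun x => decide (x ≤ dAt depths i))
      < (depths.drop (i + 1)).length := by
    unfold bnd cnt at h
    simp only [List.length_drop]
    omega
  have h1 := List.findIdx_getElem (w := hlt)
  rw [List.getElem_drop] at h1
  have h1' : depths[i + 1 + (depths.drop (i + 1)).findIdx (fun x => decide (x ≤ dAt depths i))]'(by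
      simp only [List.length_drop] at hlt; omega) ≤ dAt depths i := of_decide_eq_true h1
  have hidx : bnd depths i = i + 1 + (depths.drop (i + 1)).findIdx (fun x => decide (x ≤ dAt depths i)) := rfl
  have h2 : dAt depths (bnd depths i) = depths[bnd depths i]'hlen :=
    List.getD_eq_getElem depths 0 hlen
  rw [h2]
  simp only [hidx]
  exact h1'

theorem le_bnd_of_forall (depths : List Int) {i k : Nat} (_hik : i < k) (hk : k ≤ depths.length)
    (H : ∀ j, i < j → j < k → dAt depths i < dAt depths j) : k ≤ bnd depths i := by
  by_contra hcon
  rw [Nat.not_le] at hcon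
  have h2 : bnd depths i < depths.length := lt_of_lt_of_le hcon hk
  have h3 := bnd_stop depths h2
  have h4 := H (bnd depths i) (lt_bnd depths i) hcon
  omega

-- B's while-pop on the stack `chain k` lands exactly on `chain (bnd i)`
theorem pop_chain (depths : List Int) (fuel : Nat) : ∀ i k, depths.length - k ≤ fuel →
    i < depths.length → i < k → k ≤ depths.length →
    (∀ j, i < j → j < k → dAt depths i < dAt depths j) →
    altPopWhile depths (dAt depths i) ((chain depths k).map (Nat.cast)) =
      (chain depths (bnd depths i)).map (Nat.cast) := by
  induction fuel with
  | zero =>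
    intro i k hf hi hik hk H
    have hk' : k = depths.length := by omega
    subst hk'
    have hb : bnd depths i = depths.length :=
      le_antisymm (bnd_le depths hi) (le_bnd_of_forall depths hik le_rfl H)
    rw [chain_nil depths le_rfl, hb, chain_nil depths le_rfl]
    simp [altPopWhile]
  | succ f ih =>
    intro i k hf hi hik hk H
    by_cases hkn : k < depths.length
    · rw [chain_cons depths hkn]
      simp only [List.map_cons, altPopWhile, PySem.List.pyGetD_natCast]
      have hgd : depths.getD k 0 = dAt depths k := rfl
      rw [hgd]
      by_cases hd : dAt depths i < dAt depths k
      · rw [if_pos (by exact hd)]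
        apply ih
        · have := lt_bnd depths k; omega
        · exact hi
        · have := lt_bnd depths k; omega
        · exact bnd_le depths hkn
        · intro j hj1 hj2
          rcases lt_trichotomy j k with hlt | heq | hgt
          · exact H j hj1 hlt
          · subst heq; exact hd
          · exact lt_trans hd (lt_dAt_of_lt_bnd depths hgt hj2)
      · rw [if_neg (by exact hd)]
        have hb : bnd depths i = k := by
          have h1 : k ≤ bnd depths i := le_bnd_of_forall depths hik (le_of_lt hkn) H
          have h2 : bnd depths i ≤ k := by
            by_contra hcon
            rw [Nat.not_le] at hcon
            exact hd (lt_dAt_of_lt_bnd depths hik hcon)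
          omega
        rw [hb, chain_cons depths hkn, List.map_cons]
    · have hk' : k = depths.length := by omega
      subst hk'
      have hb : bnd depths i = depths.length :=
        le_antisymm (bnd_le depths hi) (le_bnd_of_forall depths hik le_rfl H)
      rw [chain_nil depths le_rfl, hb, chain_nil depths le_rfl]
      simp [altPopWhile]

-- the backward loop from index length-1 down to m: boundary segment and stack
theorem loop_chain (depths : List Int) (fuel : Nat) : ∀ m, depths.length - m ≤ fuel →
    m ≤ depths.length →
    (PySem.List.pyRange ((depths.length : Int) - 1) ((m : Int) - 1) (-1)).foldl
        (altStep depths) ([], []) =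
      (((List.range' m (depths.length - m)).map (fun i => (bnd depths i : Int))).reverse,
       (chain depths m).map Nat.cast) := by
  induction fuel with
  | zero =>
    intro m hf hm
    have hm' : m = depths.length := by omega
    subst hm'
    rw [PySem.List.pyRange_neg_one_eq_nil le_rfl, chain_nil depths le_rfl]
    simp
  | succ f ih =>
    intro m hf hm
    by_cases hmn : m < depths.length
    · have hsplit : PySem.List.pyRange ((depths.length : Int) - 1) ((m : Int) - 1) (-1)
          = PySem.List.pyRange ((depths.length : Int) - 1) (((m + 1 : Nat) : Int) - 1) (-1) ++ [(m : Int)] := by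
        rw [PySem.List.pyRange_neg_one_eq_reverse, PySem.List.pyRange_neg_one_eq_reverse]
        push_cast
        rw [show (m : Int) - 1 + 1 = (m : Int) by ring,
          show (m : Int) + 1 - 1 + 1 = (m : Int) + 1 by ring]
        rw [PySem.List.pyRange_one_cons (show (m : Int) < (depths.length : Int) - 1 + 1 by omega)]
        rw [List.reverse_cons]
      rw [hsplit, List.foldl_append]
      rw [ih (m + 1) (by omega) (by omega)]
      have hpop : altPopWhile depths (depths.getD m 0)
            ((chain depths (m + 1)).map Nat.cast)
          = (chain depths (bnd depths m)).map Nat.cast :=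
        pop_chain depths depths.length m (m + 1) (by omega) hmn (by omega) (by omega)
          (by intro j hj1 hj2; omega)
      have hentry : (match (chain depths (bnd depths m)).map (Nat.cast (R := Int)) with
          | [] => (depths.length : Int) | t :: _ => t) = (bnd depths m : Int) := by
        by_cases hb : bnd depths m < depths.length
        · rw [chain_cons depths hb]; simp
        · have hb' : bnd depths m = depths.length := by
            have := bnd_le depths hmn; omega
          rw [hb', chain_nil depths le_rfl]; simp
      simp only [List.foldl_cons, List.foldl_nil, altStep, PySem.List.pyGetD_natCast, hpop, hentry]
      rw [Prod.mk.injEq]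
      refine ⟨?_, ?_⟩
      · have hr : depths.length - m = (depths.length - (m + 1)) + 1 := by omega
        rw [hr, List.range'_succ, List.map_cons, List.reverse_cons]
      · rw [chain_cons depths hmn, List.map_cons]
    · have hm' : m = depths.length := by omega
      subst hm'
      rw [PySem.List.pyRange_neg_one_eq_nil le_rfl, chain_nil depths le_rfl]
      simp

-- A's inner loop appends the run 1, 2, …, shifted by j
theorem aInner_eq (d : Int) (rest : List (List (String × Int))) : ∀ (j : Int) (acc : List Int),
    aInner d rest j acc
      = acc ++ PySem.List.pyRange (j + 1)
          (j + 1 + (rest.findIdx (fun s => decide (pyDepth s ≤ d)) : Int)) 1 := by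
  induction rest with
  | nil =>
    intro j acc
    simp [aInner, PySem.List.pyRange_one_eq_nil]
  | cons s rest ih =>
    intro j acc
    by_cases hd : pyDepth s > d
    · have hfalse : (fun s => decide (pyDepth s ≤ d)) s = false := by simp; omega
      simp only [aInner, if_pos hd, List.findIdx_cons, hfalse, cond_false]
      rw [ih]
      rw [show ((rest.findIdx (fun s => decide (pyDepth s ≤ d)) + 1 : Nat) : Int)
          = (rest.findIdx (fun s => decide (pyDepth s ≤ d)) : Int) + 1 by push_cast; ring]
      conv_rhs => rw [PySem.List.pyRange_one_cons (show j + 1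
        < j + 1 + ((rest.findIdx (fun s => decide (pyDepth s ≤ d)) : Int) + 1) by omega)]
      rw [show j + 1 + ((rest.findIdx (fun s => decide (pyDepth s ≤ d)) : Int) + 1)
          = j + 1 + 1 + (rest.findIdx (fun s => decide (pyDepth s ≤ d)) : Int) by ring]
      simp
    · have htrue : (fun s => decide (pyDepth s ≤ d)) s = true := by simp; omega
      simp only [aInner, if_neg hd, List.findIdx_cons, htrue, cond_true]
      simp [PySem.List.pyRange_one_eq_nil]

-- the per-section run emitted by A for section k
def segA (sl : List (List (String × Int))) (k : Nat) : List Int :=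
  PySem.List.pyRange 1
    (1 + ((sl.drop (k + 1)).findIdx (fun s => decide (pyDepth s ≤ pyDepth (sl.getD k []))) : Int)) 1

theorem A_fold (sl : List (List (String × Int))) (fuel : Nat) : ∀ (k : Nat) (acc : List Int),
    sl.length - k ≤ fuel → k ≤ sl.length →
    (PySem.List.enumerate (sl.drop k) (k : Int)).foldl
      (fun acc p => aInner (pyDepth p.2) (PySem.List.slice sl (some (p.1 + 1)) none) 0 acc) acc
      = acc ++ ((List.range' k (sl.length - k)).map (segA sl)).flatten := by
  induction fuel with
  | zero =>
    intro k acc hf hk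
    have hk' : k = sl.length := by omega
    subst hk'
    simp [List.drop_length, PySem.List.enumerate_nil]
  | succ f ih =>
    intro k acc hf hk
    by_cases hkn : k < sl.length
    · rw [List.drop_eq_getElem_cons hkn, PySem.List.enumerate_cons, List.foldl_cons]
      have hsl : PySem.List.slice sl (some ((k : Int) + 1)) none = sl.drop (k + 1) := by
        rw [show (k : Int) + 1 = ((k + 1 : Nat) : Int) by push_cast; ring,
          PySem.List.slice_from_natCast]
      rw [hsl, aInner_eq]
      have hgd : sl.getD k [] = sl[k] := List.getD_eq_getElem sl [] hkn
      have hseg : ([] : List Int) ++ PySem.List.pyRange (0 + 1)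
          (0 + 1 + ((sl.drop (k + 1)).findIdx (fun s => decide (pyDepth s ≤ pyDepth sl[k])) : Int)) 1
          = segA sl k := by
        unfold segA
        rw [hgd]
        norm_num
      have hstep : (acc ++ PySem.List.pyRange (0 + 1)
          (0 + 1 + ((sl.drop (k + 1)).findIdx (fun s => decide (pyDepth s ≤ pyDepth sl[k])) : Int)) 1)
          = acc ++ segA sl k := by
        rw [← hseg]; simp
      rw [hstep, show (k : Int) + 1 = ((k + 1 : Nat) : Int) by push_cast; ring]
      rw [ih (k + 1) (acc ++ segA sl k) (by omega) (by omega)]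
      have hr : sl.length - k = (sl.length - (k + 1)) + 1 := by omega
      rw [hr, List.range'_succ, List.map_cons, List.flatten_cons, List.append_assoc]
    · have hk' : k = sl.length := by omega
      subst hk'
      simp [List.drop_length, PySem.List.enumerate_nil]

theorem A_eq (sl : List (List (String × Int))) :
    calculate_num_children sl = ((List.range sl.length).map (segA sl)).flatten := by
  unfold calculate_num_children
  have h := A_fold sl sl.length 0 [] (by omega) (by omega)
  simp only [List.drop_zero, Nat.cast_zero, Nat.sub_zero, List.nil_append] at h
  rw [h, List.range_eq_range']

theorem B_eq (sl : List (List (String × Int))) :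
    calculate_num_children_alt sl
      = ((List.range sl.length).map
          (fun k => PySem.List.pyRange 1 ((bnd (sl.map pyDepth) k : Int) - (k : Int)) 1)).flatten := by
  have hdef : calculate_num_children_alt sl
      = (PySem.List.enumerate (((((PySem.List.pyRange 0 ((sl.length : Int)) 1).reverse).foldl
            (altStep (sl.map pyDepth)) ([], [])).1).reverse) 0).foldl
          (fun acc p => acc ++ PySem.List.pyRange 1 (p.2 - p.1) 1) [] := rfl
  rw [hdef]
  have hn : (sl.map pyDepth).length = sl.length := by simp
  have h1 : (PySem.List.pyRange 0 (sl.length : Int) 1).reverse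
      = PySem.List.pyRange (((sl.map pyDepth).length : Int) - 1) (((0 : Nat) : Int) - 1) (-1) := by
    rw [PySem.List.pyRange_neg_one_eq_reverse]
    norm_num [hn]
  rw [h1, loop_chain (sl.map pyDepth) (sl.map pyDepth).length 0 (by omega) (by omega)]
  simp only [List.reverse_reverse, Nat.sub_zero, List.range_eq_range', hn]
  rw [PySem.List.foldl_append_eq_flatMap (g := fun p : Int × Int => PySem.List.pyRange 1 (p.2 - p.1) 1)]
  rw [List.nil_append]
  rw [List.flatMap_def]
  congr 1
  apply List.ext_getElem
  · simp [PySem.List.length_enumerate]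
  · intro i h1' h2'
    have hi : i < sl.length := by
      simp only [List.length_map, List.length_range'] at h2'
      exact h2'
    simp only [List.getElem_map, PySem.List.getElem_enumerate, List.getElem_range']
    norm_num

theorem AB_eq (sl : List (List (String × Int))) :
    calculate_num_children sl = calculate_num_children_alt sl := by
  rw [A_eq, B_eq]
  congr 1
  apply List.map_congr_left
  intro k hk
  rw [List.mem_range] at hk
  unfold segA
  have hdrop : (sl.map pyDepth).drop (k + 1) = (sl.drop (k + 1)).map pyDepth :=
    (List.map_drop).symm
  have hd : dAt (sl.map pyDepth) k = pyDepth (sl.getD k []) := by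
    have hk' : k < (sl.map pyDepth).length := by simpa using hk
    rw [dAt, List.getD_eq_getElem _ _ hk', List.getD_eq_getElem _ _ hk, List.getElem_map]
  have hc : cnt (sl.map pyDepth) k
      = (sl.drop (k + 1)).findIdx (fun s => decide (pyDepth s ≤ pyDepth (sl.getD k []))) := by
    rw [cnt, hdrop, List.findIdx_map, hd]
    rfl
  rw [← hc]
  congr 1
  simp only [bnd]
  push_cast
  ring

-- ===== VERDICT (by name: the statement is the Claim_ definition above) =====
theorem calculate_num_children_spec : Claim_equal_calculate_num_children := by
  intro sl _ _
  unfold Spec_calculate_num_children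
  exact AB_eq sl
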